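-- pv_equiv track=rewrite | github.com/hoangthanh283/xai-personality-detection | scripts/analyze_datasets.py | analyze_duplicates
-- ===== SOURCE A (Python) =====
-- from collections import Counter
-- from typing import Any
--
-- def analyze_duplicates(records: list[dict[str, Any]]) -> dict[str, Any]:
--     ids = Counter(str(r.get("id")) for r in records)
--     texts = Counter(str(r.get("text", "")) for r in records)
--     duplicate_ids = sum(1 for v in ids.values() if v > 1)
--     duplicate_texts = sum(1 for v in texts.values() if v > 1)
--     return {
--         "unique_ids": len(ids),
--         "duplicate_id_values": duplicate_ids,
--         "duplicate_id_records": sum(v for v in ids.values() if v > 1),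
--         "unique_texts": len(texts),
--         "duplicate_text_values": duplicate_texts,
--         "duplicate_text_records": sum(v for v in texts.values() if v > 1),
--     }
-- ===== SOURCE B (Python) =====
-- def analyze_duplicates(records: list[dict[str, object]]) -> dict[str, object]:
--     def run_stats(values):
--         unique = dup_vals = dup_recs = 0
--         prev = None
--         run = 0
--         for v in sorted(values):
--             if run > 0 and v == prev:
--                 run += 1
--             else:
--                 if run > 1:
--                     dup_vals += 1
--                     dup_recs += run
--                 if run > 0:
--                     unique += 1
--                 prev = v
--                 run = 1
--         if run > 1:
--             dup_vals += 1
--             dup_recs += run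
--         if run > 0:
--             unique += 1
--         return unique, dup_vals, dup_recs
--
--     u_i, dv_i, dr_i = run_stats([str(r.get("id")) for r in records])
--     u_t, dv_t, dr_t = run_stats([str(r.get("text", "")) for r in records])
--     return {
--         "unique_ids": u_i,
--         "duplicate_id_values": dv_i,
--         "duplicate_id_records": dr_i,
--         "unique_texts": u_t,
--         "duplicate_text_values": dv_t,
--         "duplicate_text_records": dr_t,
--     }
-- ===== Notes on version B (the rewrite author's own statement) =====
-- stated objective: alternative
-- what changed: Replaces the two Counter hash tables with sorting each extracted string list and a single run-length scan over the sorted list that accumulates unique/duplicate-value/duplicate-record counts.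
import Mathlib
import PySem

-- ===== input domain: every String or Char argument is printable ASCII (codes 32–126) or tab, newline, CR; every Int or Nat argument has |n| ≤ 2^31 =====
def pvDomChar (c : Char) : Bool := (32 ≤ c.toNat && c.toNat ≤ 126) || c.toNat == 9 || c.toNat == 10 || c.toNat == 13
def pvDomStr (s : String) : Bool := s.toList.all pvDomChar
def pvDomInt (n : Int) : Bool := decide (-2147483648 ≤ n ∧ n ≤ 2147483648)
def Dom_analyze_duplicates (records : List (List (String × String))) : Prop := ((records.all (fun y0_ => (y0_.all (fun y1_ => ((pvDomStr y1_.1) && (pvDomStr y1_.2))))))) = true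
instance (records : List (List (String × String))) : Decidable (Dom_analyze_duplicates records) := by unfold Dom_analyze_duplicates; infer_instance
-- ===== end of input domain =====

-- B replaces the two Counter tables by sorting each extracted string list and scanning runs once;
-- objective: alternative (a genuinely different algorithm of similar cost, not measured faster).

-- ===== PORT A =====
-- str(r.get("id")) : values are strings, str(None) = "None"
def pvIdStr (r : List (String × String)) : String :=
  match (PySem.Dict.mk r).get? "id" with
  | some s => s
  | none => "None"

-- str(r.get("text", "")) : values are strings
def pvTextStr (r : List (String × String)) : String :=
  (PySem.Dict.mk r).getD "text" ""

def analyze_duplicates (records : List (List (String × String))) : List (String × Int) :=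
  let ids := PySem.Dict.counter (records.map pvIdStr)
  let texts := PySem.Dict.counter (records.map pvTextStr)
  let duplicate_ids : Int := ((ids.values.filter (fun v => decide (1 < v))).length : Int)
  let duplicate_texts : Int := ((texts.values.filter (fun v => decide (1 < v))).length : Int)
  [("unique_ids", (ids.size : Int)),
   ("duplicate_id_values", duplicate_ids),
   ("duplicate_id_records", (ids.values.filter (fun v => decide (1 < v))).sum),
   ("unique_texts", (texts.size : Int)),
   ("duplicate_text_values", duplicate_texts),
   ("duplicate_text_records", (texts.values.filter (fun v => decide (1 < v))).sum)]

-- ===== PORT B =====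
-- state: (prev, run, unique, dup_vals, dup_recs); run = 0 means "no run open" (Python prev = None)
def pvStep (st : String × Int × Int × Int × Int) (v : String) : String × Int × Int × Int × Int :=
  let (prev, run, u, dv, dr) := st
  if run > 0 && v == prev then
    (prev, run + 1, u, dv, dr)
  else
    (v, 1, (if run > 0 then u + 1 else u),
     (if run > 1 then dv + 1 else dv), (if run > 1 then dr + run else dr))

-- closing the final run after the loop
def pvClose (st : String × Int × Int × Int × Int) : Int × Int × Int :=
  let (_, run, u, dv, dr) := st
  ((if run > 0 then u + 1 else u),
   (if run > 1 then dv + 1 else dv), (if run > 1 then dr + run else dr))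

def pvRunStats (values : List String) : Int × Int × Int :=
  pvClose ((PySem.List.sorted values (fun x => x) false).foldl pvStep ("", 0, 0, 0, 0))

def analyze_duplicates_alt (records : List (List (String × String))) : List (String × Int) :=
  let i := pvRunStats (records.map pvIdStr)
  let t := pvRunStats (records.map pvTextStr)
  [("unique_ids", i.1),
   ("duplicate_id_values", i.2.1),
   ("duplicate_id_records", i.2.2),
   ("unique_texts", t.1),
   ("duplicate_text_values", t.2.1),
   ("duplicate_text_records", t.2.2)]

-- ===== PRECONDITION & SPEC =====
def Spec_analyze_duplicates (records : List (List (String × String))) (out : List (String × Int)) : Prop := out = analyze_duplicates_alt records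
instance (records : List (List (String × String))) (out : List (String × Int)) : Decidable (Spec_analyze_duplicates records out) := by unfold Spec_analyze_duplicates; infer_instance

-- ===== CLAIM (what is proved, stated in full; the proofs are below) =====
def Claim_equal_analyze_duplicates : Prop := ∀ (records : List (List (String × String))), Dom_analyze_duplicates records → Spec_analyze_duplicates records (analyze_duplicates records)

-- ===== LEMMAS AND PROOFS =====

-- canonical statistics of a string list (proof-only helpers)
def pvU (l : List String) : Int := ((PySem.Set.ofList l).length : Int)
def pvDup (l : List String) : List String :=
  (PySem.Set.ofList l).filter (fun k => decide ((1 : Int) < (l.count k : Int)))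
def pvDV (l : List String) : Int := ((pvDup l).length : Int)
def pvDR (l : List String) : Int := ((pvDup l).map (fun k => ((l.count k : Int)))).sum

-- A-side characterisation
lemma counter_size (l : List String) :
    ((PySem.Dict.counter l).size : Int) = pvU l := by
  simp [PySem.Dict.size, PySem.Dict.items_counter, pvU]

lemma counter_values (l : List String) :
    (PySem.Dict.counter l).values = (PySem.Set.ofList l).map (fun k => ((l.count k : Int))) := by
  simp [PySem.Dict.values, PySem.Dict.items_counter]

lemma counter_dv (l : List String) :
    (((PySem.Dict.counter l).values.filter (fun v => decide (1 < v))).length : Int) = pvDV l := by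
  rw [counter_values]
  simp [List.filter_map, pvDV, pvDup, Function.comp_def, Nat.one_lt_cast]

lemma counter_dr (l : List String) :
    ((PySem.Dict.counter l).values.filter (fun v => decide (1 < v))).sum = pvDR l := by
  rw [counter_values]
  simp [List.filter_map, pvDR, pvDup, Function.comp_def, Nat.one_lt_cast]

-- ofList commutes with removing one value
lemma discard_eq_filter (y : String) (s : List String) :
    PySem.Set.discard s y = s.filter (fun a => decide (a ≠ y)) := by
  simp only [PySem.Set.discard]
  exact List.filter_congr (by intro a _; by_cases h : a = y <;> simp [h])

lemma ofList_filter_ne (y : String) (l : List String) :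
    PySem.Set.ofList (l.filter (fun z => z ≠ y)) = (PySem.Set.ofList l).discard y := by
  rw [discard_eq_filter]
  induction l with
  | nil => simp [PySem.Set.ofList]
  | cons z t ih =>
    by_cases hz : z = y
    · subst hz
      rw [List.filter_cons_of_neg (by simp), ih, PySem.Set.ofList_cons, discard_eq_filter,
        List.filter_cons_of_neg (by simp), List.filter_filter]
      exact (List.filter_congr (by intro a _; simp)).symm
    · rw [List.filter_cons_of_pos (by simp [hz]), PySem.Set.ofList_cons, PySem.Set.ofList_cons,
        discard_eq_filter, discard_eq_filter, ih, List.filter_cons_of_pos (by simp [hz]),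
        List.filter_filter, List.filter_filter]
      exact congrArg _ (List.filter_congr (by intro a _; rw [Bool.and_comm]))

-- peel lemmas: remove the whole group of the head
lemma mem_pvDupFilter_ne (y k : String) (t : List String)
    (hk : k ∈ PySem.Set.ofList (t.filter (fun z => z ≠ y))) : k ≠ y := by
  rw [PySem.Set.mem_ofList] at hk
  simpa using (List.of_mem_filter hk)

lemma count_cons_filter (y k : String) (t : List String) (hky : k ≠ y) :
    ((y :: t).count k : Int) = (((t.filter (fun z => z ≠ y)).count k : Int)) := by
  rw [List.count_filter (by simp [hky]), List.count_cons]
  simp [Ne.symm hky]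

lemma pvU_peel (y : String) (t : List String) :
    pvU (y :: t) = 1 + pvU (t.filter (fun z => z ≠ y)) := by
  unfold pvU
  rw [PySem.Set.ofList_cons, ← ofList_filter_ne]
  push_cast [List.length_cons]
  ring

lemma pvDup_peel (y : String) (t : List String) :
    pvDup (y :: t) = (if 0 < t.count y then [y] else []) ++ pvDup (t.filter (fun z => z ≠ y)) := by
  unfold pvDup
  rw [PySem.Set.ofList_cons, ← ofList_filter_ne, List.filter_cons]
  have htail : List.filter (fun k => decide ((1:Int) < (((y :: t).count k : Int))))
        (PySem.Set.ofList (t.filter (fun z => z ≠ y)))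
      = List.filter (fun k => decide ((1:Int) < (((t.filter (fun z => z ≠ y)).count k : Int))))
        (PySem.Set.ofList (t.filter (fun z => z ≠ y))) := by
    apply List.filter_congr
    intro k hk
    rw [count_cons_filter y k t (mem_pvDupFilter_ne y k t hk)]
  rw [htail]
  have hc : (y :: t).count y = t.count y + 1 := by simp [List.count_cons]
  by_cases h : 0 < t.count y
  · rw [if_pos (by rw [decide_eq_true_iff, hc]; push_cast; omega), if_pos h]
    rfl
  · rw [if_neg (by simp only [decide_eq_true_eq]; rw [hc]; push_cast; omega), if_neg h]
    rfl

lemma pvDV_peel (y : String) (t : List String) :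
    pvDV (y :: t) = (if (1:Int) < 1 + t.count y then 1 else 0) + pvDV (t.filter (fun z => z ≠ y)) := by
  unfold pvDV
  rw [pvDup_peel]
  by_cases h : 0 < t.count y
  · rw [if_pos h, if_pos (by push_cast; omega)]
    simp only [List.length_append, List.length_cons, List.length_nil]
    push_cast
    ring
  · rw [if_neg h, if_neg (by push_cast; omega)]
    simp

lemma pvDR_peel (y : String) (t : List String) :
    pvDR (y :: t) = (if (1:Int) < 1 + t.count y then 1 + (t.count y : Int) else 0)
      + pvDR (t.filter (fun z => z ≠ y)) := by
  unfold pvDR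
  rw [pvDup_peel]
  have htail : (pvDup (t.filter (fun z => z ≠ y))).map (fun k => (((y :: t).count k : Int)))
      = (pvDup (t.filter (fun z => z ≠ y))).map (fun k => (((t.filter (fun z => z ≠ y)).count k : Int))) := by
    apply List.map_congr_left
    intro k hk
    have hk' : k ∈ PySem.Set.ofList (t.filter (fun z => z ≠ y)) := List.mem_of_mem_filter hk
    exact count_cons_filter y k t (mem_pvDupFilter_ne y k t hk')
  rw [List.map_append, htail, List.sum_append]
  by_cases h : 0 < t.count y
  · rw [if_pos h, if_pos (by push_cast; omega)]
    simp [List.count_cons]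
    push_cast
    ring
  · rw [if_neg h, if_neg (by push_cast; omega)]
    simp

-- invariant of B's scan loop
lemma fold_scan (t : List String) (hs : t.Pairwise (· ≤ ·)) :
    ∀ (p : String) (k u dv dr : Int), (∀ y ∈ t, p ≤ y) → 1 ≤ k →
    pvClose (t.foldl pvStep (p, k, u, dv, dr)) =
      (u + 1 + pvU (t.filter (fun z => z ≠ p)),
       dv + (if 1 < k + t.count p then 1 else 0) + pvDV (t.filter (fun z => z ≠ p)),
       dr + (if 1 < k + t.count p then k + t.count p else 0) + pvDR (t.filter (fun z => z ≠ p))) := by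
  induction t with
  | nil =>
    intro p k u dv dr _ hk
    simp only [List.foldl_nil, List.filter_nil, List.count_nil, pvClose]
    have h0 : pvU [] = 0 := rfl
    have h1 : pvDV [] = 0 := rfl
    have h2 : pvDR [] = 0 := rfl
    rw [h0, h1, h2]
    push_cast
    simp only [Prod.mk.injEq]
    refine ⟨?_, ?_, ?_⟩ <;> first | trivial | (split_ifs <;> omega)
  | cons y t' ih =>
    intro p k u dv dr hp hk
    rw [List.pairwise_cons] at hs
    obtain ⟨hy, hs'⟩ := hs
    by_cases hyp : y = p
    · subst hyp
      rw [List.foldl_cons]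
      have hstep : pvStep (y, k, u, dv, dr) y = (y, k + 1, u, dv, dr) := by
        simp [pvStep]; omega
      rw [hstep, ih hs' y (k + 1) u dv dr hy (by omega)]
      have hcnt : ((y :: t').count y : Int) = (t'.count y : Int) + 1 := by
        rw [List.count_cons]; simp
      rw [List.filter_cons_of_neg (by simp), hcnt]
      simp only [Prod.mk.injEq]
      refine ⟨?_, ?_, ?_⟩ <;> first | trivial | (split_ifs <;> omega)
    · have hlt : ∀ z ∈ t', p < z := by
        intro z hz
        exact lt_of_lt_of_le (lt_of_le_of_ne (hp y (by simp)) (Ne.symm hyp)) (hy z hz)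
      have hnp : p ∉ t' := fun hmem => absurd rfl (ne_of_gt (hlt p hmem))
      have hcnt0 : t'.count p = 0 := List.count_eq_zero.mpr hnp
      have hfilt : t'.filter (fun z => z ≠ p) = t' :=
        List.filter_eq_self.mpr (fun a ha => by simp; exact fun h => absurd rfl (ne_of_gt (h ▸ hlt a ha)))
      rw [List.foldl_cons]
      have hstep : pvStep (p, k, u, dv, dr) y =
          (y, 1, (if k > 0 then u + 1 else u), (if k > 1 then dv + 1 else dv),
           (if k > 1 then dr + k else dr)) := by
        simp [pvStep, hyp]
      rw [hstep, ih hs' y 1 _ _ _ hy (by omega)]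
      rw [List.filter_cons_of_pos (by simp [hyp]), hfilt]
      have hcc : (y :: t').count p = 0 := by
        rw [List.count_cons, hcnt0]; simp [hyp]
      rw [hcc, pvU_peel, pvDV_peel, pvDR_peel]
      push_cast
      simp only [Prod.mk.injEq]
      refine ⟨?_, ?_, ?_⟩ <;> first | trivial | (split_ifs <;> omega)

lemma scan_sorted (s : List String) (hs : s.Pairwise (· ≤ ·)) :
    pvClose (s.foldl pvStep ("", 0, 0, 0, 0)) = (pvU s, pvDV s, pvDR s) := by
  cases s with
  | nil => simp [pvClose, pvU, pvDV, pvDR, pvDup, PySem.Set.ofList]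
  | cons x t =>
    rw [List.pairwise_cons] at hs
    obtain ⟨hx, hs'⟩ := hs
    rw [List.foldl_cons]
    have hstep : pvStep ("", 0, 0, 0, 0) x = (x, 1, 0, 0, 0) := by
      simp [pvStep]
    rw [hstep, fold_scan t hs' x 1 0 0 0 hx (by omega)]
    rw [pvU_peel, pvDV_peel, pvDR_peel]
    simp only [Prod.mk.injEq]
    refine ⟨?_, ?_, ?_⟩ <;> first | trivial | (split_ifs <;> omega)

lemma stats_perm (s l : List String) (h : s.Perm l) :
    pvU s = pvU l ∧ pvDV s = pvDV l ∧ pvDR s = pvDR l := by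
  have hset : (PySem.Set.ofList s).Perm (PySem.Set.ofList l) :=
    (List.perm_ext_iff_of_nodup (PySem.Set.nodup_ofList s) (PySem.Set.nodup_ofList l)).mpr
      (fun a => by rw [PySem.Set.mem_ofList, PySem.Set.mem_ofList]; exact h.mem_iff)
  have hcnt : ∀ k : String, s.count k = l.count k := h.count_eq
  have hdup : (pvDup s).Perm (pvDup l) := by
    unfold pvDup
    have : (PySem.Set.ofList s).filter (fun k => decide ((1 : Int) < (s.count k : Int)))
        = (PySem.Set.ofList s).filter (fun k => decide ((1 : Int) < (l.count k : Int))) :=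
      List.filter_congr (fun k _ => by rw [hcnt k])
    rw [this]
    exact hset.filter _
  refine ⟨?_, ?_, ?_⟩
  · unfold pvU; rw [hset.length_eq]
  · unfold pvDV; rw [hdup.length_eq]
  · unfold pvDR
    have : (pvDup s).map (fun k => ((s.count k : Int)))
        = (pvDup s).map (fun k => ((l.count k : Int))) :=
      List.map_congr_left (fun k _ => by rw [hcnt k])
    rw [this]
    exact List.Perm.sum_eq (hdup.map _)

lemma runStats_eq (l : List String) : pvRunStats l = (pvU l, pvDV l, pvDR l) := by
  unfold pvRunStats
  have hperm : (PySem.List.sorted l (fun x => x) false).Perm l := PySem.List.sorted_perm l _ _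
  have hpair : (PySem.List.sorted l (fun x => x) false).Pairwise (· ≤ ·) :=
    PySem.List.sorted_pairwise l (fun x => x)
  obtain ⟨h1, h2, h3⟩ := stats_perm _ l hperm
  rw [scan_sorted _ hpair, h1, h2, h3]

-- ===== VERDICT (by name: the statement is the Claim_ definition above) =====
theorem analyze_duplicates_spec : Claim_equal_analyze_duplicates := by
  intro records _
  unfold Spec_analyze_duplicates analyze_duplicates analyze_duplicates_alt
  rw [runStats_eq, runStats_eq]
  simp only [counter_size, counter_dv, counter_dr]
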